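-- pv_equiv track=rewrite | github.com/MrBrantCode/unitest_baseline | mut_generate/mist_train_taco/taco_15542/solution.py | will_flea_visit_all_hassocks
-- ===== SOURCE A (Python) =====
-- def will_flea_visit_all_hassocks(n: int) -> str:
--     visited = [False] * n
--     k = 0
--     for i in range(n ** 2 + 1):
--         k += i + 1
--         visited[k % n] = True
--
--     for i in visited:
--         if not i:
--             return 'NO'
--
--     return 'YES'
-- ===== SOURCE B (Python) =====
-- def will_flea_visit_all_hassocks(n: int) -> str:
--     # The flea reaches every hassock iff n is a power of two:
--     # strip factors of 2 and check what remains.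
--     m = n
--     while m > 0 and m % 2 == 0:
--         m //= 2
--     return 'YES' if m == 1 else 'NO'
-- ===== Notes on version B (the rewrite author's own statement) =====
-- stated objective: faster
-- what changed: Replaced the O(n^2)-step simulation of the flea's jumps over a visited array by the closed-form number-theoretic criterion: all hassocks are visited iff n is a power of two, computed by stripping factors of 2.
-- outside the precondition, e.g. on will_flea_visit_all_hassocks(0): A raises ZeroDivisionError, B returns 'NO'; on will_flea_visit_all_hassocks(-1): A raises IndexError, B returns 'NO'
import Mathlib
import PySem

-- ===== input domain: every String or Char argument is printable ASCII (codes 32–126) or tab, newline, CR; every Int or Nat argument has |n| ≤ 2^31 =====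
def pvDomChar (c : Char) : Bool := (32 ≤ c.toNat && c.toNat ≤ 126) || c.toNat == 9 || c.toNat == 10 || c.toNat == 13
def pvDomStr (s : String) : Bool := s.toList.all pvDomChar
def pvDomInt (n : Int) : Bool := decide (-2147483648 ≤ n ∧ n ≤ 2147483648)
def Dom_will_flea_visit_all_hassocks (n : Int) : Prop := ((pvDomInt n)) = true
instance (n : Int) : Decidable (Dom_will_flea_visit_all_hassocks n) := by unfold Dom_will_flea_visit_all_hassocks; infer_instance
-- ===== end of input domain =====

-- B replaces A's O(n^2)-step jump simulation by the power-of-two criterion (strip factors of 2), an asymptotic speed-up.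

-- ===== PORT A =====
-- the trailing 'for i in visited: if not i: return NO / return YES' loop of A
def pvFleaCheck : List Bool → String
  | [] => "YES"
  | i :: rest => if !i then "NO" else pvFleaCheck rest

-- the body of A's 'for i in range(n ** 2 + 1)' loop: k += i + 1; visited[k % n] = True
def pvFleaStep (n : Int) (st : List Bool × Int) (i : Int) : List Bool × Int :=
  let k := st.2 + (i + 1)
  (PySem.List.pySetD st.1 (PySem.Int.mod k n) true, k)

def will_flea_visit_all_hassocks (n : Int) : String :=
  let visited := List.replicate n.toNat false
  let st := (PySem.List.pyRange 0 (n ^ 2 + 1) 1).foldl (pvFleaStep n) (visited, 0)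
  pvFleaCheck st.1

-- ===== PORT B =====
-- B's 'while m > 0 and m % 2 == 0: m //= 2' loop
def pvStripTwos (m : Int) : Int :=
  if _h : 0 < m ∧ PySem.Int.mod m 2 = 0 then pvStripTwos (PySem.Int.floordiv m 2) else m
termination_by m.toNat
decreasing_by
  rw [PySem.Int.floordiv_eq_ediv_of_pos (by omega)]
  have h2 : PySem.Int.mod m 2 = m % 2 := PySem.Int.mod_eq_emod_of_pos (by omega)
  omega

def will_flea_visit_all_hassocks_alt (n : Int) : String :=
  if pvStripTwos n = 1 then "YES" else "NO"

-- ===== PRECONDITION & SPEC =====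
-- A raises for n ≤ 0 (ZeroDivisionError at n = 0, IndexError on the empty list for n < 0)
def Pre_will_flea_visit_all_hassocks (n : Int) : Prop := 1 ≤ n
instance (n : Int) : Decidable (Pre_will_flea_visit_all_hassocks n) := by unfold Pre_will_flea_visit_all_hassocks; infer_instance
def pvWitness_will_flea_visit_all_hassocks : Int := 6

def Spec_will_flea_visit_all_hassocks (n : Int) (out : String) : Prop := out = will_flea_visit_all_hassocks_alt n
instance (n : Int) (out : String) : Decidable (Spec_will_flea_visit_all_hassocks n out) := by unfold Spec_will_flea_visit_all_hassocks; infer_instance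

-- ===== CLAIM (what is proved, stated in full; the proofs are below) =====
def Claim_equal_will_flea_visit_all_hassocks : Prop := ∀ (n : Int), Dom_will_flea_visit_all_hassocks n → Pre_will_flea_visit_all_hassocks n → Spec_will_flea_visit_all_hassocks n (will_flea_visit_all_hassocks n)

-- ===== LEMMAS AND PROOFS =====

-- triangular numbers, the flea's position after j jumps
def pvT : Nat → Nat
  | 0 => 0
  | k + 1 => pvT k + (k + 1)

theorem pvT_two (k : Nat) : 2 * pvT k = k * (k + 1) := by
  induction k with
  | zero => rfl
  | succ k ih => show 2 * (pvT k + (k + 1)) = _; rw [mul_add, ih]; ring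

-- exact period identity  T(k + 2N) = T k + N * (2k + 2N + 1)
theorem pvT_period (k N : Nat) : pvT (k + 2 * N) = pvT k + N * (2 * k + 2 * N + 1) := by
  apply Nat.eq_of_mul_eq_mul_left (show 0 < 2 by norm_num)
  calc 2 * pvT (k + 2 * N) = (k + 2 * N) * (k + 2 * N + 1) := pvT_two _
    _ = k * (k + 1) + 2 * (N * (2 * k + 2 * N + 1)) := by ring
    _ = 2 * pvT k + 2 * (N * (2 * k + 2 * N + 1)) := by rw [pvT_two]
    _ = 2 * (pvT k + N * (2 * k + 2 * N + 1)) := by ring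

theorem pvT_mod_period (k N : Nat) : pvT (k + 2 * N) % N = pvT k % N := by
  rw [pvT_period, Nat.add_mul_mod_self_left]

-- every residue reached is reached with an exponent in [1, 2N]
theorem pvT_reduce (N : Nat) (hN : 1 ≤ N) : ∀ k, ∃ j, 1 ≤ j ∧ j ≤ 2 * N ∧ pvT j % N = pvT k % N := by
  intro k
  induction k using Nat.strong_induction_on with
  | _ k ih =>
    rcases Nat.lt_or_ge k 1 with hk | hk
    · refine ⟨2 * N, by omega, le_refl _, ?_⟩
      interval_cases k
      have := pvT_mod_period 0 N
      simpa [pvT] using this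
    · by_cases hk2 : k ≤ 2 * N
      · exact ⟨k, hk, hk2, rfl⟩
      · obtain ⟨j, h1, h2, h3⟩ := ih (k - 2 * N) (by omega)
        refine ⟨j, h1, h2, ?_⟩
        rw [h3]
        have hper := pvT_mod_period (k - 2 * N) N
        rw [show (k - 2 * N) + 2 * N = k by omega] at hper
        exact hper.symm

-- FORWARD: triangular numbers are surjective modulo a power of two
theorem pvT_surj_pow2 : ∀ m : Nat, ∀ r < 2 ^ m, ∃ k, pvT k % 2 ^ m = r := by
  intro m
  induction m with
  | zero => intro r hr; exact ⟨0, by omega⟩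
  | succ m ih =>
    intro r hr
    set E := 2 ^ m with hE
    have hEpos : 0 < E := Nat.two_pow_pos m
    have hpow : 2 ^ (m + 1) = 2 * E := by rw [hE, pow_succ]; ring
    obtain ⟨k, hk⟩ := ih (r % E) (Nat.mod_lt _ hEpos)
    set c := pvT k % (2 * E) with hc
    have hcE : c % E = r % E := by
      rw [hc, Nat.mod_mod_of_dvd _ ⟨2, by ring⟩, hk]
    have hclt : c < 2 * E := Nat.mod_lt _ (by omega)
    -- the shift: T(k + 2E) ≡ T k + E  [mod 2E]
    have hshift : pvT (k + 2 * E) % (2 * E) = (c + E) % (2 * E) := by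
      have h1 : pvT (k + 2 * E) = (pvT k + E) + (k + E) * (2 * E) := by
        have := pvT_period k E
        apply Nat.eq_of_mul_eq_mul_left (show 0 < 2 by norm_num)
        calc 2 * pvT (k + 2 * E) = 2 * (pvT k + E * (2 * k + 2 * E + 1)) := by rw [← pvT_period k E]
          _ = 2 * (pvT k + E + (k + E) * (2 * E)) := by ring
      rw [h1, Nat.add_mul_mod_self_right, hc, Nat.mod_add_mod]
    -- decompose c and r over E
    have hr2 : r < 2 * E := by omega
    have hrE : r % E < E := Nat.mod_lt _ hEpos
    have hceq : c = r % E ∨ c = E + r % E := by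
      rcases Nat.lt_or_ge c E with h0 | h1
      · left; rw [← hcE, Nat.mod_eq_of_lt h0]
      · right
        have hsub : c % E = c - E := by
          rw [Nat.mod_eq_sub_mod h1, Nat.mod_eq_of_lt (by omega)]
        omega
    have hreq : r = r % E ∨ r = E + r % E := by
      rcases Nat.lt_or_ge r E with h0 | h1
      · left; rw [Nat.mod_eq_of_lt h0]
      · right
        have hsub : r % E = r - E := by
          rw [Nat.mod_eq_sub_mod h1, Nat.mod_eq_of_lt (by omega)]
        omega
    rcases eq_or_ne c r with hcr | hcr
    · exact ⟨k, by rw [hpow, ← hc, hcr]⟩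
    · refine ⟨k + 2 * E, ?_⟩
      rw [hpow, hshift]
      rcases hceq with hc0 | hc1 <;> rcases hreq with hr0 | hr1
      · omega
      · rw [show c + E = r by omega, Nat.mod_eq_of_lt hr2]
      · rw [show c + E = r % E + 1 * (2 * E) by omega, Nat.add_mul_mod_self_right,
          Nat.mod_eq_of_lt (by omega)]
        omega
      · omega

-- BACKWARD machinery: for odd q ≥ 3 some residue mod q is never reached
theorem pvT_mod_cancel2 {a b q : Nat} (hodd : q % 2 = 1) (h : 2 * a ≡ 2 * b [MOD q]) :
    a ≡ b [MOD q] := by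
  exact Nat.ModEq.cancel_left_of_coprime (Nat.coprime_two_right.mpr (Nat.odd_iff.mpr hodd)) h

theorem pvT_reflect (q j : Nat) (hodd : q % 2 = 1) (hj : j < q) :
    pvT (q - 1 - j) % q = pvT j % q := by
  set a := q - 1 - j with ha
  have hq : q = a + j + 1 := by omega
  have hkey : 2 * pvT a + q * (2 * j + 1) = 2 * pvT j + q * q := by
    calc 2 * pvT a + q * (2 * j + 1) = a * (a + 1) + (a + j + 1) * (2 * j + 1) := by
          rw [pvT_two, hq]
      _ = j * (j + 1) + (a + j + 1) * (a + j + 1) := by ring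
      _ = 2 * pvT j + q * q := by rw [pvT_two, hq]
  have h1 : (2 * pvT a) % q = (2 * pvT j) % q := by
    have l1 : (2 * pvT a + q * (2 * j + 1)) % q = (2 * pvT a) % q := by
      rw [mul_comm q (2 * j + 1), Nat.add_mul_mod_self_right]
    have l2 : (2 * pvT j + q * q) % q = (2 * pvT j) % q := Nat.add_mul_mod_self_right _ _ _
    rw [← l1, hkey, l2]
  exact pvT_mod_cancel2 hodd h1

theorem pvT_mod_period_odd (q : Nat) (hodd : q % 2 = 1) (k : Nat) :
    pvT (k + q) % q = pvT k % q := by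
  have hkey : 2 * pvT (k + q) = 2 * pvT k + q * (2 * k + q + 1) := by
    calc 2 * pvT (k + q) = (k + q) * (k + q + 1) := pvT_two _
      _ = k * (k + 1) + q * (2 * k + q + 1) := by ring
      _ = 2 * pvT k + q * (2 * k + q + 1) := by rw [pvT_two]
  have h1 : (2 * pvT (k + q)) % q = (2 * pvT k) % q := by
    rw [hkey, mul_comm q (2 * k + q + 1), Nat.add_mul_mod_self_right]
  exact pvT_mod_cancel2 hodd h1

theorem pvT_mod_reduce_odd (q : Nat) (hq : 0 < q) (hodd : q % 2 = 1) (k : Nat) :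
    pvT k % q = pvT (k % q) % q := by
  induction k using Nat.strong_induction_on with
  | _ k ih =>
    rcases Nat.lt_or_ge k q with h | h
    · rw [Nat.mod_eq_of_lt h]
    · have hkq : k = (k - q) + q := by omega
      rw [hkq, pvT_mod_period_odd q hodd, Nat.add_mod_right, ih (k - q) (by omega)]

theorem pvT_miss_odd (q : Nat) (hq : 3 ≤ q) (hodd : q % 2 = 1) :
    ∃ r < q, ∀ j, pvT j % q ≠ r := by
  have hqpos : 0 < q := by omega
  set S : Finset Nat := (Finset.range q).image (fun j => pvT j % q) with hS
  have hsub : S ⊆ (Finset.range ((q + 1) / 2)).image (fun j => pvT j % q) := by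
    intro x hx
    rw [hS, Finset.mem_image] at hx
    obtain ⟨j, hj, hjx⟩ := hx
    rw [Finset.mem_range] at hj
    rcases Nat.lt_or_ge j ((q + 1) / 2) with h | h
    · exact Finset.mem_image.mpr ⟨j, Finset.mem_range.mpr h, hjx⟩
    · refine Finset.mem_image.mpr ⟨q - 1 - j, Finset.mem_range.mpr (by omega), ?_⟩
      rw [pvT_reflect q j hodd hj, hjx]
  have hcard : S.card < q := by
    have h1 := Finset.card_le_card hsub
    have h2 := Finset.card_image_le (s := Finset.range ((q + 1) / 2)) (f := fun j => pvT j % q)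
    rw [Finset.card_range] at h2
    omega
  have : ¬ (Finset.range q ⊆ S) := by
    intro hsub2
    have := Finset.card_le_card hsub2
    rw [Finset.card_range] at this
    omega
  obtain ⟨r, hr, hrS⟩ := Finset.not_subset.mp this
  rw [Finset.mem_range] at hr
  refine ⟨r, hr, fun j hj => hrS ?_⟩
  rw [hS, Finset.mem_image]
  exact ⟨j % q, Finset.mem_range.mpr (Nat.mod_lt _ hqpos), by rw [← pvT_mod_reduce_odd q hqpos hodd, hj]⟩

-- the odd part, a Nat mirror of pvStripTwos
def pvOddN (n : Nat) : Nat :=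
  if h : 0 < n ∧ n % 2 = 0 then pvOddN (n / 2) else n
termination_by n
decreasing_by omega

theorem pvOddN_spec (n : Nat) (hn : 1 ≤ n) :
    pvOddN n % 2 = 1 ∧ 1 ≤ pvOddN n ∧ ∃ e, n = 2 ^ e * pvOddN n := by
  induction n using Nat.strong_induction_on with
  | _ n ih =>
    rw [pvOddN]
    split_ifs with h
    · obtain ⟨h1, h2, e, h3⟩ := ih (n / 2) (by omega) (by omega)
      refine ⟨h1, h2, e + 1, ?_⟩
      calc n = 2 * (n / 2) := by omega
        _ = 2 * (2 ^ e * pvOddN (n / 2)) := congrArg (fun t => 2 * t) h3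
        _ = 2 ^ (e + 1) * pvOddN (n / 2) := by ring
    · exact ⟨by omega, hn, 0, by simp⟩

theorem pvOddN_eq_one_iff (n : Nat) (hn : 1 ≤ n) :
    pvOddN n = 1 ↔ ∃ m, n = 2 ^ m := by
  obtain ⟨hodd, hpos, e, heq⟩ := pvOddN_spec n hn
  constructor
  · intro h; exact ⟨e, by rw [heq, h, mul_one]⟩
  · rintro ⟨m, rfl⟩
    have hdvd : pvOddN (2 ^ m) ∣ 2 ^ m := ⟨2 ^ e, heq.trans (mul_comm _ _)⟩
    have hcop : Nat.Coprime (pvOddN (2 ^ m)) 2 :=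
      Nat.coprime_two_right.mpr (Nat.odd_iff.mpr hodd)
    exact Nat.Coprime.eq_one_of_dvd (hcop.pow_right m) hdvd

-- pvStripTwos over a nonnegative Int is pvOddN over its Nat
theorem pvStripTwos_eq_oddN_aux : ∀ (N : Nat) (n : Int), 0 ≤ n → n.toNat = N →
    pvStripTwos n = (pvOddN n.toNat : Int) := by
  intro N
  induction N using Nat.strong_induction_on with
  | _ N ih =>
    intro n hn hN
    rw [pvStripTwos, pvOddN]
    have hm : PySem.Int.mod n 2 = n % 2 := PySem.Int.mod_eq_emod_of_pos (by norm_num)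
    by_cases h : 0 < n ∧ PySem.Int.mod n 2 = 0
    · rw [dif_pos h]
      have hcond : 0 < n.toNat ∧ n.toNat % 2 = 0 := by
        rw [hm] at h; omega
      rw [dif_pos hcond]
      have hf : PySem.Int.floordiv n 2 = n / 2 := PySem.Int.floordiv_eq_ediv_of_pos (by norm_num)
      rw [hf]
      have hh := ih (n.toNat / 2) (by rw [hm] at h; omega) (n / 2) (by omega) (by omega)
      rw [hh]
      have : ((n / 2 : Int)).toNat = n.toNat / 2 := by omega
      rw [this]
    · rw [dif_neg h]
      have hcond : ¬ (0 < n.toNat ∧ n.toNat % 2 = 0) := by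
        rw [hm] at h; omega
      rw [dif_neg hcond]
      omega

theorem pvStripTwos_eq_oddN (n : Int) (hn : 0 ≤ n) : pvStripTwos n = (pvOddN n.toNat : Int) :=
  pvStripTwos_eq_oddN_aux n.toNat n hn rfl

-- ==== A-side characterization ====

theorem pvFleaCheck_yes (v : List Bool) : pvFleaCheck v = "YES" ↔ ∀ b ∈ v, b = true := by
  induction v with
  | nil => simp [pvFleaCheck]
  | cons b rest ih =>
    cases b <;> simp [pvFleaCheck, ih]

def pvSetFold (idxs : List Nat) (v : List Bool) : List Bool :=
  idxs.foldl (fun v i => v.set i true) v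

theorem pvSetFold_length (idxs : List Nat) (v : List Bool) :
    (pvSetFold idxs v).length = v.length := by
  induction idxs generalizing v with
  | nil => rfl
  | cons i idxs ih => simp [pvSetFold, List.foldl_cons] at *; rw [ih]; simp

theorem pvSetFold_get (idxs : List Nat) (v : List Bool) (r : Nat) (hr : r < v.length)
    (hin : ∀ i ∈ idxs, i < v.length) :
    (pvSetFold idxs v)[r]? = if r ∈ idxs then some true else v[r]? := by
  induction idxs generalizing v with
  | nil => simp [pvSetFold]
  | cons i idxs ih =>
    have hi : i < v.length := hin i (by simp)
    have := ih (v.set i true) (by simpa) (by intro x hx; simpa using hin x (by simp [hx]))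
    simp only [pvSetFold, List.foldl_cons] at *
    rw [this]
    by_cases hri : r = i
    · subst hri
      by_cases hmem : r ∈ idxs <;> simp [hmem, hr]
    · have hset : (v.set i true)[r]? = v[r]? := List.getElem?_set_ne (Ne.symm hri)
      by_cases hmem : r ∈ idxs <;> simp [hmem, hri, hset]

-- the A-loop computes pvSetFold over the triangular residues
theorem pvMod_cast (a : Nat) (n : Int) (hn : 1 ≤ n) :
    PySem.Int.mod (a : Int) n = ((a % n.toNat : Nat) : Int) := by
  have h1 : n = ((n.toNat : Nat) : Int) := by omega
  conv_lhs => rw [h1]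
  exact PySem.Int.mod_natCast a n.toNat

theorem pvFold_eq (n : Int) (hn : 1 ≤ n) (M : Nat) :
    (PySem.List.pyRange 0 (M : Int) 1).foldl (pvFleaStep n) (List.replicate n.toNat false, 0)
      = (pvSetFold ((List.range M).map (fun j => pvT (j + 1) % n.toNat)) (List.replicate n.toNat false),
         (pvT M : Int)) := by
  induction M with
  | zero =>
    rw [show ((0 : Nat) : Int) = 0 by norm_num, PySem.List.pyRange_one_eq_nil (by norm_num)]
    simp [pvSetFold, pvT]
  | succ M ih =>
    rw [show (((M + 1 : Nat)) : Int) = (M : Int) + 1 by push_cast; ring,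
      PySem.List.pyRange_one_succ_right (by positivity), List.foldl_append, ih]
    simp only [List.foldl_cons, List.foldl_nil, pvFleaStep]
    have hk : (pvT M : Int) + ((M : Int) + 1) = ((pvT (M + 1) : Nat) : Int) := by
      show _ = ((pvT M + (M + 1) : Nat) : Int); push_cast; ring
    rw [hk, pvMod_cast _ n hn, PySem.List.pySetD_natCast]
    rw [List.range_succ, List.map_append, List.map_singleton]
    simp [pvSetFold, List.foldl_append]

-- "all true" via indices
theorem pvAll_true_iff (v : List Bool) :
    (∀ b ∈ v, b = true) ↔ ∀ r < v.length, v[r]? = some true := by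
  constructor
  · intro h r hr
    rw [List.getElem?_eq_getElem hr]
    exact congrArg some (h _ (List.getElem_mem _))
  · intro h b hb
    obtain ⟨i, hi, rfl⟩ := List.mem_iff_getElem.mp hb
    have := h i hi
    rw [List.getElem?_eq_getElem hi] at this
    exact Option.some.inj this

-- A answers YES exactly when every residue is hit by some triangular number in the loop
theorem pvA_yes_iff (n : Int) (hn : 1 ≤ n) :
    will_flea_visit_all_hassocks n = "YES" ↔
      ∀ r < n.toNat, ∃ j, j < n.toNat ^ 2 + 1 ∧ pvT (j + 1) % n.toNat = r := by
  have hN1 : 1 ≤ n.toNat := by omega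
  have hsq : (n ^ 2 + 1 : Int) = ((n.toNat ^ 2 + 1 : Nat) : Int) := by
    push_cast [Int.toNat_of_nonneg (show (0 : Int) ≤ n by omega)]; ring
  rw [show will_flea_visit_all_hassocks n
      = pvFleaCheck (((PySem.List.pyRange 0 (n ^ 2 + 1) 1).foldl (pvFleaStep n)
          (List.replicate n.toNat false, 0)).1) from rfl]
  rw [hsq, pvFold_eq n hn]
  set L := (List.range (n.toNat ^ 2 + 1)).map (fun j => pvT (j + 1) % n.toNat) with hL
  have hlen : (pvSetFold L (List.replicate n.toNat false)).length = n.toNat := by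
    rw [pvSetFold_length, List.length_replicate]
  have hinL : ∀ i ∈ L, i < (List.replicate n.toNat false).length := by
    intro i hi
    rw [hL] at hi
    simp only [List.mem_map, List.mem_range] at hi
    obtain ⟨j, _, rfl⟩ := hi
    have hm : pvT (j + 1) % n.toNat < n.toNat := Nat.mod_lt _ (by omega)
    simpa using hm
  rw [pvFleaCheck_yes, pvAll_true_iff, hlen]
  constructor
  · intro h r hr
    have := h r hr
    rw [pvSetFold_get L _ r (by rw [List.length_replicate]; exact hr) hinL] at this
    by_cases hmem : r ∈ L
    · rw [hL] at hmem
      simpa only [List.mem_map, List.mem_range] using hmem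
    · rw [if_neg hmem] at this
      rw [List.getElem?_eq_getElem (by rw [List.length_replicate]; exact hr)] at this
      simp at this
  · intro h r hr
    rw [pvSetFold_get L _ r (by rw [List.length_replicate]; exact hr) hinL, if_pos]
    rw [hL]
    simp only [List.mem_map, List.mem_range]
    obtain ⟨j, hj1, hj2⟩ := h r hr
    exact ⟨j, hj1, hj2⟩

-- the loop hits every residue iff n is a power of two (odd part 1)
theorem pvSurj_iff (N : Nat) (hN : 1 ≤ N) :
    (∀ r < N, ∃ j, j < N ^ 2 + 1 ∧ pvT (j + 1) % N = r) ↔ pvOddN N = 1 := by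
  constructor
  · intro h
    by_contra hq
    obtain ⟨hodd, hpos, e, heq⟩ := pvOddN_spec N hN
    set q := pvOddN N with hqdef
    have hq3 : 3 ≤ q := by omega
    obtain ⟨r, hrq, hmiss⟩ := pvT_miss_odd q hq3 hodd
    have hdvd : q ∣ N := ⟨2 ^ e, heq.trans (mul_comm _ _)⟩
    have hqN : q ≤ N := Nat.le_of_dvd (by omega) hdvd
    obtain ⟨j, _, hj⟩ := h r (by omega)
    have : pvT (j + 1) % q = r := by
      rw [← Nat.mod_mod_of_dvd _ hdvd, hj, Nat.mod_eq_of_lt hrq]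
    exact hmiss _ this
  · intro h r hr
    obtain ⟨m, rfl⟩ := (pvOddN_eq_one_iff N hN).mp h
    obtain ⟨k, hk⟩ := pvT_surj_pow2 m r hr
    obtain ⟨j, hj1, hj2, hj3⟩ := pvT_reduce (2 ^ m) hN k
    have h2N : 2 * 2 ^ m ≤ (2 ^ m) ^ 2 + 1 := by
      rcases Nat.lt_or_ge (2 ^ m) 2 with hlt | hge
      · have h1 : 2 ^ m = 1 := by omega
        rw [h1]; norm_num
      · have : 2 * 2 ^ m ≤ 2 ^ m * 2 ^ m := Nat.mul_le_mul_right _ hge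
        rw [pow_two]; omega
    refine ⟨j - 1, by omega, ?_⟩
    rw [show j - 1 + 1 = j by omega, hj3, hk]

-- B answers YES exactly when the odd part is 1
theorem pvB_yes_iff (n : Int) (hn : 1 ≤ n) :
    will_flea_visit_all_hassocks_alt n = "YES" ↔ pvOddN n.toNat = 1 := by
  unfold will_flea_visit_all_hassocks_alt
  rw [pvStripTwos_eq_oddN n (by omega)]
  constructor
  · intro h
    by_cases hc : ((pvOddN n.toNat : Nat) : Int) = 1
    · omega
    · rw [if_neg hc] at h; exact absurd h (by decide)
  · intro h
    rw [if_pos (by omega)]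

theorem pvFleaCheck_cases (v : List Bool) :
    pvFleaCheck v = "YES" ∨ pvFleaCheck v = "NO" := by
  induction v with
  | nil => left; rfl
  | cons b rest ih =>
    cases b
    · right; rfl
    · simpa [pvFleaCheck] using ih

theorem pvA_cases (n : Int) :
    will_flea_visit_all_hassocks n = "YES" ∨ will_flea_visit_all_hassocks n = "NO" :=
  pvFleaCheck_cases _

theorem pvB_cases (n : Int) :
    will_flea_visit_all_hassocks_alt n = "YES" ∨ will_flea_visit_all_hassocks_alt n = "NO" := by
  unfold will_flea_visit_all_hassocks_alt
  split_ifs <;> simp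

-- ===== VERDICT (by name: the statement is the Claim_ definition above) =====
theorem will_flea_visit_all_hassocks_spec : Claim_equal_will_flea_visit_all_hassocks := by
  intro n _ hpre
  unfold Spec_will_flea_visit_all_hassocks
  have hn : 1 ≤ n := hpre
  have hiff : will_flea_visit_all_hassocks n = "YES" ↔
      will_flea_visit_all_hassocks_alt n = "YES" := by
    rw [pvA_yes_iff n hn, pvB_yes_iff n hn]
    exact pvSurj_iff n.toNat (by omega)
  rcases pvA_cases n with hA | hA <;> rcases pvB_cases n with hB | hB
  · rw [hA, hB]
  · rw [hA] at hiff ⊢; rw [hB] at hiff; exact absurd (hiff.mp rfl) (by decide)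
  · rw [hB] at hiff ⊢; rw [hA] at hiff; exact absurd (hiff.mpr rfl) (by decide)
  · rw [hA, hB]
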